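-- pv_equiv track=rewrite | github.com/lwhere/BGPAgent | tool_use/as_path_group_format.py | format_as_json
-- ===== SOURCE A (Python) =====
-- def format_as_json(as_paths):
--     formatted_paths = []
--     for i in range(0, len(as_paths), 20):
--         group = as_paths[i:i+20]
--         entry = {}
--         for j, path in enumerate(group):
--             entry[f"number{j+1}"] = '|'.join(path)
--         formatted_paths.append(entry)
--     return formatted_paths
-- ===== SOURCE B (Python) =====
-- def format_as_json(as_paths):
--     formatted_paths = []
--     for idx, path in enumerate(as_paths):
--         if idx % 20 == 0:
--             formatted_paths.append({})
--         formatted_paths[-1][f"number{idx % 20 + 1}"] = '|'.join(path)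
--     return formatted_paths
-- ===== Notes on version B (the rewrite author's own statement) =====
-- stated objective: simpler
-- what changed: Replaced A's nested loops (outer range-step-20 loop slicing out each chunk, inner enumerate over the slice) by a single flat enumerate pass over all paths that starts a new dict when idx % 20 == 0 and addresses the key by idx % 20 + 1, so no slices or inner loop are built.
import Mathlib
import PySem

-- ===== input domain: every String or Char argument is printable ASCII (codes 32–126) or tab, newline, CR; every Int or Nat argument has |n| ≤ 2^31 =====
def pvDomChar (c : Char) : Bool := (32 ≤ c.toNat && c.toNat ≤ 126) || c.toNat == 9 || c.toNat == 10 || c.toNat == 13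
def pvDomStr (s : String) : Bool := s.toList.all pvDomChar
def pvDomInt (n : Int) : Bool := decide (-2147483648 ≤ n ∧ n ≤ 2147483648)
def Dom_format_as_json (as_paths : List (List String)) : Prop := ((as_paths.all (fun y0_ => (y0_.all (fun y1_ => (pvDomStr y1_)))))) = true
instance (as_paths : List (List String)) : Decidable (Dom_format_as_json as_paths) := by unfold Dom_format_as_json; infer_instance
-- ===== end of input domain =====

-- B replaces A's nested chunk-slice/inner-enumerate loops by one flat enumerate pass that
-- locates each path's group and key with idx % 20 (objective: simpler, same O(n) cost).

-- ===== PORT A =====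
def format_as_json (as_paths : List (List String)) : List (List (String × String)) :=
  (PySem.List.pyRange 0 (PySem.List.len as_paths) 20).foldl
    (fun formatted_paths i =>
      let group := PySem.List.slice as_paths (some i) (some (i + 20))
      let entry : PySem.Dict String String :=
        (PySem.List.enumerate group 0).foldl
          (fun entry jp =>
            entry.insert ("number" ++ PySem.Int.toStr (jp.1 + 1)) (PySem.Str.join "|" jp.2))
          PySem.Dict.empty
      formatted_paths ++ [entry.items])
    []

-- ===== PORT B =====
def format_as_json_alt (as_paths : List (List String)) : List (List (String × String)) :=
  ((PySem.List.enumerate as_paths 0).foldl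
    (fun formatted_paths p =>
      let formatted_paths :=
        if PySem.Int.mod p.1 20 = 0 then formatted_paths ++ [(PySem.Dict.empty : PySem.Dict String String)]
        else formatted_paths
      -- formatted_paths[-1][f"number{idx % 20 + 1}"] = '|'.join(path)
      formatted_paths.dropLast ++
        [(formatted_paths.getLast?.getD PySem.Dict.empty).insert
          ("number" ++ PySem.Int.toStr (PySem.Int.mod p.1 20 + 1)) (PySem.Str.join "|" p.2)])
    []).map (fun d => d.items)

-- ===== PRECONDITION & SPEC =====
def Spec_format_as_json (as_paths : List (List String)) (out : List (List (String × String))) : Prop := out = format_as_json_alt as_paths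
instance (as_paths : List (List String)) (out : List (List (String × String))) : Decidable (Spec_format_as_json as_paths out) := by unfold Spec_format_as_json; infer_instance

-- ===== CLAIM (what is proved, stated in full; the proofs are below) =====
def Claim_equal_format_as_json : Prop := ∀ (as_paths : List (List String)), Dom_format_as_json as_paths → Spec_format_as_json as_paths (format_as_json as_paths)

-- ===== LEMMAS AND PROOFS =====

-- the dict built for one group, as both programs build it
def pvEntry (c : List (List String)) : PySem.Dict String String :=
  (PySem.List.enumerate c 0).foldl
    (fun entry jp =>
      entry.insert ("number" ++ PySem.Int.toStr (jp.1 + 1)) (PySem.Str.join "|" jp.2))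
    PySem.Dict.empty

-- the common result: the list of group dicts, one per chunk of 20
def pvDicts : List (List String) → List (PySem.Dict String String)
  | [] => []
  | x :: xs => pvEntry ((x :: xs).take 20) :: pvDicts ((x :: xs).drop 20)
  termination_by l => l.length
  decreasing_by simp

theorem pvDicts_nil : pvDicts [] = [] := by simp [pvDicts]

theorem pvDicts_cons (l : List (List String)) (h : l ≠ []) :
    pvDicts l = pvEntry (l.take 20) :: pvDicts (l.drop 20) := by
  cases l with
  | nil => exact absurd rfl h
  | cons x xs => rw [pvDicts.eq_def]

theorem pvMod20 (m j : Nat) (hj : j < 20) :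
    PySem.Int.mod (20 * (m : Int) + (j : Int)) 20 = (j : Int) := by
  simp [PySem.Int.mod, Int.fmod_eq_emod]
  omega

theorem pvRange20_nil (a b : Int) (h : b ≤ a) : PySem.List.pyRange a b 20 = [] := by
  rw [PySem.List.pyRange_of_pos a b (show (0:Int) < 20 by norm_num)]
  rw [if_neg (by omega)]
  simp

theorem pvRange20_cons (a b : Int) (h : a < b) :
    PySem.List.pyRange a b 20 = a :: PySem.List.pyRange (a + 20) b 20 := by
  rw [PySem.List.pyRange_of_pos a b (show (0:Int) < 20 by norm_num),
      PySem.List.pyRange_of_pos (a + 20) b (show (0:Int) < 20 by norm_num)]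
  rw [if_pos h]
  by_cases h2 : a + 20 < b
  · rw [if_pos h2]
    have hn : ((b - a + 20 - 1) / 20).toNat = ((b - (a + 20) + 20 - 1) / 20).toNat + 1 := by
      omega
    rw [hn, List.range_succ_eq_map]
    simp only [List.map_cons, List.map_map, Nat.cast_zero, mul_zero, add_zero]
    congr 1
    apply List.map_congr_left
    intro k _
    simp [Function.comp]
    ring
  · rw [if_neg h2]
    have hn : ((b - a + 20 - 1) / 20).toNat = 1 := by omega
    rw [hn]
    simp

-- A's outer loop, generalized over the starting offset
theorem pvA_aux (l : List (List String)) :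
    ∀ (fuel a : Nat) (acc : List (List (String × String))), l.length ≤ a + fuel →
      (PySem.List.pyRange (a : Int) (PySem.List.len l) 20).foldl
        (fun formatted_paths i =>
          let group := PySem.List.slice l (some i) (some (i + 20))
          let entry : PySem.Dict String String :=
            (PySem.List.enumerate group 0).foldl
              (fun entry jp =>
                entry.insert ("number" ++ PySem.Int.toStr (jp.1 + 1)) (PySem.Str.join "|" jp.2))
              PySem.Dict.empty
          formatted_paths ++ [entry.items]) acc
      = acc ++ (pvDicts (l.drop a)).map (fun d => d.items) := by
  intro fuel
  induction fuel with
  | zero =>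
    intro a acc h
    rw [pvRange20_nil _ _ (by simp [PySem.List.len]; omega)]
    rw [List.drop_eq_nil_of_le (by omega)]
    simp [pvDicts_nil]
  | succ f ih =>
    intro a acc h
    by_cases hlt : a < l.length
    · rw [pvRange20_cons _ _ (by simp [PySem.List.len]; exact_mod_cast hlt)]
      rw [List.foldl_cons]
      have hslice : PySem.List.slice l (some (a : Int)) (some ((a : Int) + 20)) = (l.drop a).take 20 := by
        have := PySem.List.slice_natCast_add l a 20
        push_cast at this ⊢
        exact this
      simp only [hslice]
      have hcast : ((a : Int) + 20) = ((a + 20 : Nat) : Int) := by push_cast; ring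
      rw [hcast, ih (a + 20) _ (by omega)]
      rw [pvDicts_cons (l.drop a) (by intro hc; rw [List.drop_eq_nil_iff] at hc; omega)]
      rw [List.drop_drop]
      simp [pvEntry, List.append_assoc]
    · rw [pvRange20_nil _ _ (by simp [PySem.List.len]; omega)]
      rw [List.drop_eq_nil_of_le (by omega)]
      simp [pvDicts_nil]

-- B's pass across the interior of one group (index ≡ j mod 20, 1 ≤ j)
theorem pvB_inner (c : List (List String)) :
    ∀ (m j : Nat) (d : PySem.Dict String String) (done : List (PySem.Dict String String)),
      1 ≤ j → j + c.length ≤ 20 →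
      (PySem.List.enumerate c (20 * (m : Int) + (j : Int))).foldl
        (fun formatted_paths p =>
          let formatted_paths :=
            if PySem.Int.mod p.1 20 = 0 then formatted_paths ++ [(PySem.Dict.empty : PySem.Dict String String)]
            else formatted_paths
          formatted_paths.dropLast ++
            [(formatted_paths.getLast?.getD PySem.Dict.empty).insert
              ("number" ++ PySem.Int.toStr (PySem.Int.mod p.1 20 + 1)) (PySem.Str.join "|" p.2)])
        (done ++ [d])
      = done ++ [(PySem.List.enumerate c (j : Int)).foldl
          (fun entry jp =>
            entry.insert ("number" ++ PySem.Int.toStr (jp.1 + 1)) (PySem.Str.join "|" jp.2)) d] := by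
  induction c with
  | nil => intro m j d done _ _; simp [PySem.List.enumerate_nil]
  | cons x xs ih =>
    intro m j d done hj hle
    rw [PySem.List.enumerate_cons, PySem.List.enumerate_cons, List.foldl_cons, List.foldl_cons]
    simp only [pvMod20 m j (by simp at hle; omega)]
    rw [if_neg (by simp at hle ⊢; omega)]
    rw [List.dropLast_concat, List.getLast?_concat]
    simp only [Option.getD_some]
    have hc : (20 * (m : Int) + (j : Int)) + 1 = 20 * (m : Int) + ((j + 1 : Nat) : Int) := by
      push_cast; ring
    rw [hc]
    rw [ih m (j + 1) _ done (by omega) (by simp at hle ⊢; omega)]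
    have hc2 : ((j : Int)) + 1 = ((j + 1 : Nat) : Int) := by push_cast; ring
    rw [hc2]

-- B's pass across one full group of ≤ 20 paths
theorem pvB_chunk (c : List (List String)) (m : Nat) (done : List (PySem.Dict String String))
    (hne : c ≠ []) (hle : c.length ≤ 20) :
    (PySem.List.enumerate c (20 * (m : Int))).foldl
      (fun formatted_paths p =>
        let formatted_paths :=
          if PySem.Int.mod p.1 20 = 0 then formatted_paths ++ [(PySem.Dict.empty : PySem.Dict String String)]
          else formatted_paths
        formatted_paths.dropLast ++
          [(formatted_paths.getLast?.getD PySem.Dict.empty).insert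
            ("number" ++ PySem.Int.toStr (PySem.Int.mod p.1 20 + 1)) (PySem.Str.join "|" p.2)])
      done
    = done ++ [pvEntry c] := by
  cases c with
  | nil => exact absurd rfl hne
  | cons x xs =>
    rw [PySem.List.enumerate_cons, List.foldl_cons]
    have h0 : PySem.Int.mod (20 * (m : Int)) 20 = 0 := by
      have := pvMod20 m 0 (by omega)
      simpa using this
    simp only [h0]
    simp only [if_true]
    rw [List.dropLast_concat, List.getLast?_concat]
    simp only [Option.getD_some]
    have hc : (20 * (m : Int)) + 1 = 20 * (m : Int) + ((1 : Nat) : Int) := by push_cast; ring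
    rw [hc]
    rw [pvB_inner xs m 1 _ done (by omega) (by simp at hle ⊢; omega)]
    rw [pvEntry, PySem.List.enumerate_cons, List.foldl_cons]
    norm_num

-- B's whole fold produces the list of group dicts
theorem pvB_aux :
    ∀ (fuel : Nat) (l : List (List String)) (m : Nat) (done : List (PySem.Dict String String)),
      l.length ≤ fuel →
      (PySem.List.enumerate l (20 * (m : Int))).foldl
        (fun formatted_paths p =>
          let formatted_paths :=
            if PySem.Int.mod p.1 20 = 0 then formatted_paths ++ [(PySem.Dict.empty : PySem.Dict String String)]
            else formatted_paths
          formatted_paths.dropLast ++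
            [(formatted_paths.getLast?.getD PySem.Dict.empty).insert
              ("number" ++ PySem.Int.toStr (PySem.Int.mod p.1 20 + 1)) (PySem.Str.join "|" p.2)])
        done
      = done ++ pvDicts l := by
  intro fuel
  induction fuel with
  | zero =>
    intro l m done h
    have : l = [] := List.eq_nil_of_length_eq_zero (by omega)
    subst this
    simp [PySem.List.enumerate_nil, pvDicts_nil]
  | succ f ih =>
    intro l m done h
    rcases List.eq_nil_or_concat l with hnil | _
    · subst hnil; simp [PySem.List.enumerate_nil, pvDicts_nil]
    · have hne : l ≠ [] := by rintro rfl; simp_all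
      by_cases h20 : l.length ≤ 20
      · rw [pvB_chunk l m done hne h20]
        rw [pvDicts_cons l hne, List.take_of_length_le h20,
            List.drop_eq_nil_of_le h20, pvDicts_nil]
      · have hsplit : l = l.take 20 ++ l.drop 20 := (List.take_append_drop 20 l).symm
        rw [hsplit, PySem.List.enumerate_append, List.foldl_append]
        rw [pvB_chunk (l.take 20) m done (by simp; omega) (by simp)]
        have hlen : ((l.take 20).length : Int) = 20 := by simp; omega
        rw [hlen]
        have hc : 20 * (m : Int) + 20 = 20 * ((m + 1 : Nat) : Int) := by push_cast; ring
        rw [hc]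
        rw [ih (l.drop 20) (m + 1) _ (by simp; omega)]
        rw [← hsplit]
        rw [pvDicts_cons l hne]
        simp [List.append_assoc]

-- ===== VERDICT (by name: the statement is the Claim_ definition above) =====
theorem format_as_json_spec : Claim_equal_format_as_json := by
  intro as_paths _
  unfold Spec_format_as_json format_as_json format_as_json_alt
  have hA := pvA_aux as_paths as_paths.length 0 [] (by omega)
  simp only [Nat.cast_zero] at hA
  rw [show (PySem.List.len as_paths) = ((as_paths.length : Nat) : Int) by simp [PySem.List.len]] at hA ⊢
  rw [hA]
  have hB := pvB_aux as_paths.length as_paths 0 [] (le_refl _)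
  simp only [Nat.cast_zero, mul_zero] at hB
  rw [hB]
  simp
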